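-- pv_equiv track=rewrite | github.com/ilyakmet/Algorithms-and-data-structures | 3.py | min_cost_grig
-- ===== SOURCE A (Python) =====
-- INFINITY = 10 ** 10
--
-- def min_cost_grig(costs, jumps):
-- 	min_cost = [INFINITY] * len(costs)
-- 	min_cost[0] = costs[0]
-- 	for i in range(1, len(costs)):
-- 		r = [INFINITY]
-- 		for j in jumps:
-- 			if j <= i:
-- 				r.append(min_cost[i - j])
-- 		min_cost[i] = costs[i] + min(r)
-- 	return min_cost
-- ===== SOURCE B (Python) =====
-- INFINITY = 10 ** 10
--
-- def min_cost_grig(costs, jumps):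
--     # Push-based (forward relaxation) DP instead of A's pull-based scan:
--     # best[t] holds the cheapest already-finalized predecessor cost for t.
--     n = len(costs)
--     best = [INFINITY] * n
--     min_cost = [INFINITY] * n
--     min_cost[0] = costs[0]
--     for k in range(n):
--         if k > 0:
--             min_cost[k] = costs[k] + best[k]
--         for j in jumps:
--             if j > 0 and k + j < n:
--                 best[k + j] = min(best[k + j], min_cost[k])
--     return min_cost
-- ===== Notes on version B (the rewrite author's own statement) =====
-- stated objective: alternative
-- what changed: Replaced A's pull-based DP (for each index, scan jumps and take the min over predecessor values collected in a fresh list) by a push-based forward-relaxation DP that keeps a best[] array of cheapest finalized predecessors and relaxes best[k+j] as each index k is finalized, so no per-index list is built and min() is never called on a list.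
-- crash fix: On non-empty costs of length >= 2 with some negative jump, A raises IndexError (min_cost[i-j] past the end); B skips non-forward jumps and returns the DP over the positive jumps only. — e.g. on min_cost_grig([1, 2], [-1]): A raises IndexError, B returns [1, 10000000002]
import Mathlib
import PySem

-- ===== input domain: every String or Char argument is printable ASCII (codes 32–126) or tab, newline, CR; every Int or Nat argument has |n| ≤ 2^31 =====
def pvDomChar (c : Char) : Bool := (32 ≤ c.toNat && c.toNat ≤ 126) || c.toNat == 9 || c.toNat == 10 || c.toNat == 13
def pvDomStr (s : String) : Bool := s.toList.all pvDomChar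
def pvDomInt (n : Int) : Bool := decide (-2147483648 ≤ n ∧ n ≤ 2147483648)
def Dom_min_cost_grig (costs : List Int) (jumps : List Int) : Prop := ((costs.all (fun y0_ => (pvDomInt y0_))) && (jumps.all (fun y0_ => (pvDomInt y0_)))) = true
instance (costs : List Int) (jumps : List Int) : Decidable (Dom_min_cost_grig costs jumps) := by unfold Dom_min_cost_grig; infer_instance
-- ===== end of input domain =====

-- B replaces A's pull-based DP (per-index list of predecessor values, then min) by a
-- push-based forward-relaxation DP over a best[] array; same O(n*m) cost, alternative algorithm.

def INF : Int := 10 ^ 10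

-- ===== PORT A =====
-- Python A, step for step.  range(1, len(costs)) is List.range' 1 (n-1) (indices are the Nats
-- 1..n-1, exactly Python's).  min_cost[i-j] is pyGet? (exact, negative index wraps); the
-- '.getD 0' default is only taken where Python raises IndexError (excluded by Pre_).
def min_cost_grig (costs : List Int) (jumps : List Int) : List Int :=
  let n := costs.length
  let init := (List.replicate n INF).set 0 ((PySem.List.pyGet? costs 0).getD 0)
  (List.range' 1 (n - 1)).foldl
    (fun mc (i : Nat) =>
      let r := jumps.foldl
        (fun r j => if j ≤ (i : Int) then r ++ [(PySem.List.pyGet? mc ((i : Int) - j)).getD 0] else r)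
        [INF]
      mc.set i (costs.getD i 0 + (PySem.List.min? r (fun x => x)).getD 0))
    init

-- ===== PORT B =====
-- Python B, step for step: finalize min_cost[k] from best[k], then relax best[k+j] for the
-- positive jumps; state is the pair (best, min_cost), k runs over range(len(costs)).
def min_cost_grig_alt (costs : List Int) (jumps : List Int) : List Int :=
  let n := costs.length
  let best0 := List.replicate n INF
  let mc0 := (List.replicate n INF).set 0 ((PySem.List.pyGet? costs 0).getD 0)
  ((List.range n).foldl
    (fun (st : List Int × List Int) (k : Nat) =>
      let mc := if k = 0 then st.2 else st.2.set k (costs.getD k 0 + st.1.getD k 0)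
      let best := jumps.foldl
        (fun b j =>
          if 0 < j ∧ (k : Int) + j < (n : Int) then
            b.set ((k : Int) + j).toNat (min (b.getD ((k : Int) + j).toNat 0) (mc.getD k 0))
          else b)
        st.1
      (best, mc))
    (best0, mc0)).2

-- ===== PRECONDITION & SPEC =====
-- Pre_ excludes exactly the inputs where Python A raises IndexError: empty costs
-- (min_cost[0] = costs[0]), and a negative jump with len(costs) >= 2 (min_cost[i-j] past the end).
def Pre_min_cost_grig (costs : List Int) (jumps : List Int) : Prop :=
  costs ≠ [] ∧ (2 ≤ costs.length → ∀ j ∈ jumps, 0 ≤ j)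
instance (costs : List Int) (jumps : List Int) : Decidable (Pre_min_cost_grig costs jumps) := by
  unfold Pre_min_cost_grig; infer_instance

def pvWitness_min_cost_grig : List Int × List Int := ([1, 2, 3], [1, 2])

-- On non-empty costs of length >= 2 with some negative jump, A raises IndexError; B skips
-- non-forward jumps and returns the DP over the positive jumps only.
def Raises_min_cost_grig (costs : List Int) (jumps : List Int) : Prop :=
  2 ≤ costs.length ∧ ∃ j ∈ jumps, j < 0
instance (costs : List Int) (jumps : List Int) : Decidable (Raises_min_cost_grig costs jumps) := by
  unfold Raises_min_cost_grig; infer_instance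
def pvRaiseWitness_min_cost_grig : List Int × List Int := ([1, 2], [-1])
def pvRaiseWitnessOut_min_cost_grig : List Int := [1, 10000000002]

def Spec_min_cost_grig (costs : List Int) (jumps : List Int) (out : List Int) : Prop :=
  out = min_cost_grig_alt costs jumps
instance (costs : List Int) (jumps : List Int) (out : List Int) : Decidable (Spec_min_cost_grig costs jumps out) := by
  unfold Spec_min_cost_grig; infer_instance

-- ===== CLAIM (what is proved, stated in full; the proofs are below) =====
def Claim_equal_min_cost_grig : Prop := ∀ (costs : List Int) (jumps : List Int), Dom_min_cost_grig costs jumps → Pre_min_cost_grig costs jumps → Spec_min_cost_grig costs jumps (min_cost_grig costs jumps)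

def Claim_raises_min_cost_grig : Prop := (∀ (costs : List Int) (jumps : List Int), Dom_min_cost_grig costs jumps → Raises_min_cost_grig costs jumps → ¬ Pre_min_cost_grig costs jumps) ∧ (Dom_min_cost_grig (pvRaiseWitness_min_cost_grig.1) (pvRaiseWitness_min_cost_grig.2) ∧ Raises_min_cost_grig (pvRaiseWitness_min_cost_grig.1) (pvRaiseWitness_min_cost_grig.2) ∧ min_cost_grig_alt (pvRaiseWitness_min_cost_grig.1) (pvRaiseWitness_min_cost_grig.2) = pvRaiseWitnessOut_min_cost_grig)

-- ===== LEMMAS AND PROOFS =====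

theorem pvGetD_set_self (xs : List Int) (i : Nat) (h : i < xs.length) (v : Int) :
    (xs.set i v).getD i 0 = v := by
  simp [List.getD_eq_getElem?_getD, h]

theorem pvGetD_set_ne (xs : List Int) (i t : Nat) (h : i ≠ t) (v : Int) :
    (xs.set i v).getD t 0 = xs.getD t 0 := by
  simp [List.getD_eq_getElem?_getD, h]

def Mfold (l : List Int) (c : Int → Prop) [DecidablePred c] (v : Int → Int) (a : Int) : Int :=
  l.foldl (fun a j => if c j then min a (v j) else a) a

theorem Mfold_cons (l : List Int) (j : Int) (c : Int → Prop) [DecidablePred c] (v : Int → Int)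
    (a : Int) : Mfold (j :: l) c v a = Mfold l c v (if c j then min a (v j) else a) := rfl

theorem Mfold_min_init (l : List Int) (c : Int → Prop) [DecidablePred c] (v : Int → Int) :
    ∀ (a x : Int), Mfold l c v (min x a) = min x (Mfold l c v a) := by
  induction l with
  | nil => intro a x; rfl
  | cons j l ih =>
    intro a x
    rw [Mfold_cons, Mfold_cons]
    by_cases h : c j
    · simp only [h, if_pos]
      rw [min_assoc, ih]
    · simp only [h, if_neg, not_false_iff, ih]

theorem Mfold_merge (l : List Int) (c1 c2 : Int → Prop) [DecidablePred c1] [DecidablePred c2]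
    (v : Int → Int) : ∀ a : Int,
    Mfold l c1 v (Mfold l c2 v a) = Mfold l (fun j => c1 j ∨ c2 j) v a := by
  induction l with
  | nil => intro a; rfl
  | cons j l ih =>
    intro a
    rw [Mfold_cons, Mfold_cons, Mfold_cons]
    by_cases h1 : c1 j
    · have hpull : ∀ b : Int, (if c1 j then min (Mfold l c2 v b) (v j) else Mfold l c2 v b)
          = Mfold l c2 v (min (v j) b) := by
        intro b
        simp only [h1, if_pos]
        rw [min_comm, Mfold_min_init]
      rw [hpull, ih]
      congr 1
      by_cases h2 : c2 j <;> simp only [h1, h2, if_pos, if_neg, not_false_iff, true_or] <;> omega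
    · by_cases h2 : c2 j <;>
        simp only [h1, h2, if_pos, if_neg, not_false_iff, false_or, ih]

theorem Mfold_ext (c1 c2 : Int → Prop) [DecidablePred c1] [DecidablePred c2]
    (v1 v2 : Int → Int) (B : Int) : ∀ (l : List Int) (a : Int), a ≤ B →
    (∀ j ∈ l, (c2 j → (c1 j ∧ v1 j = v2 j)) ∧ (c1 j → ¬ c2 j → v1 j = B)) →
    Mfold l c1 v1 a = Mfold l c2 v2 a := by
  intro l
  induction l with
  | nil => intro a _ _; rfl
  | cons j l ih =>
    intro a ha h
    rw [Mfold_cons, Mfold_cons]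
    have hj := h j (List.mem_cons_self ..)
    have hl : ∀ x ∈ l, (c2 x → (c1 x ∧ v1 x = v2 x)) ∧ (c1 x → ¬ c2 x → v1 x = B) :=
      fun x hx => h x (List.mem_cons_of_mem _ hx)
    by_cases h2 : c2 j
    · obtain ⟨hc1, hv⟩ := hj.1 h2
      simp only [h2, hc1, if_pos, hv]
      exact ih _ (by omega) hl
    · by_cases h1 : c1 j
      · have hINF := hj.2 h1 h2
        simp only [h1, h2, if_pos, if_neg, not_false_iff, hINF]
        have : min a B = a := by omega
        rw [this]
        exact ih _ ha hl
      · simp only [h1, h2, if_neg, not_false_iff]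
        exact ih _ ha hl

theorem Mfold_congr (c1 c2 : Int → Prop) [DecidablePred c1] [DecidablePred c2]
    (v1 v2 : Int → Int) : ∀ (l : List Int) (a : Int),
    (∀ j ∈ l, (c1 j ↔ c2 j) ∧ (c1 j → v1 j = v2 j)) →
    Mfold l c1 v1 a = Mfold l c2 v2 a := by
  intro l
  induction l with
  | nil => intro a _; rfl
  | cons j l ih =>
    intro a h
    rw [Mfold_cons, Mfold_cons]
    have hj := h j (List.mem_cons_self ..)
    have hl := fun x hx => h x (List.mem_cons_of_mem _ hx)
    by_cases h1 : c1 j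
    · simp only [h1, hj.1.mp h1, if_pos, hj.2 h1]
      exact ih _ hl
    · have h2 : ¬ c2 j := fun h' => h1 (hj.1.mpr h')
      simp only [h1, h2, if_neg, not_false_iff]
      exact ih _ hl

theorem pvMin?_append (r : List Int) (a x : Int) (h : PySem.List.min? r (fun y => y) = some a) :
    PySem.List.min? (r ++ [x]) (fun y => y) = some (min a x) := by
  unfold PySem.List.min? at h ⊢
  rw [List.foldl_append, h]
  simp only [List.foldl_cons, List.foldl_nil]
  by_cases hx : x < a
  · simp only [hx, if_pos]
    congr 1
    omega
  · simp only [hx, if_neg, not_false_iff]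
    congr 1
    omega

theorem pvBuildMin (c : Int → Prop) [DecidablePred c] (v : Int → Int) :
    ∀ (l : List Int) (r : List Int) (a : Int), PySem.List.min? r (fun y => y) = some a →
    (PySem.List.min? (l.foldl (fun r j => if c j then r ++ [v j] else r) r) (fun y => y)).getD 0
      = Mfold l c v a := by
  intro l
  induction l with
  | nil =>
    intro r a h
    simp only [List.foldl_nil, h, Option.getD_some, Mfold, List.foldl_nil]
  | cons j l ih =>
    intro r a h
    simp only [List.foldl_cons, Mfold_cons]
    by_cases hc : c j
    · simp only [hc, if_pos]
      exact ih _ _ (pvMin?_append r a (v j) h)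
    · simp only [hc, if_neg, not_false_iff]
      exact ih _ _ h

theorem pvPush_length (jumps : List Int) (k n' : Nat) (mc : List Int) :
    ∀ best : List Int,
    (jumps.foldl (fun b j =>
        if 0 < j ∧ (k : Int) + j < (n' : Int) then
          b.set ((k : Int) + j).toNat (min (b.getD ((k : Int) + j).toNat 0) (mc.getD k 0))
        else b) best).length = best.length := by
  induction jumps with
  | nil => intro best; rfl
  | cons j l ih =>
    intro best
    simp only [List.foldl_cons]
    by_cases hc : 0 < j ∧ (k : Int) + j < (n' : Int)
    · rw [if_pos hc, ih, List.length_set]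
    · rw [if_neg hc, ih]

theorem pvPush_getD (k n' t : Nat) (mc : List Int) :
    ∀ (l : List Int) (best : List Int), best.length = n' →
    (l.foldl (fun b j =>
        if 0 < j ∧ (k : Int) + j < (n' : Int) then
          b.set ((k : Int) + j).toNat (min (b.getD ((k : Int) + j).toNat 0) (mc.getD k 0))
        else b) best).getD t 0
      = Mfold l (fun j => 0 < j ∧ (k : Int) + j < (n' : Int) ∧ (k : Int) + j = (t : Int))
          (fun _ => mc.getD k 0) (best.getD t 0) := by
  intro l
  induction l with
  | nil => intro best _; rfl
  | cons j l ih =>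
    intro best hlen
    simp only [List.foldl_cons, Mfold_cons]
    by_cases hc : 0 < j ∧ (k : Int) + j < (n' : Int)
    · rw [if_pos hc]
      by_cases he : (k : Int) + j = (t : Int)
      · have htn : ((k : Int) + j).toNat = t := by omega
        rw [ih _ (by rw [List.length_set, hlen])]
        rw [if_pos (show 0 < j ∧ (k : Int) + j < (n' : Int) ∧ (k : Int) + j = (t : Int) from
          ⟨hc.1, hc.2, he⟩)]
        rw [htn, pvGetD_set_self best t (by omega) _]
      · have htn : ((k : Int) + j).toNat ≠ t := by omega
        rw [ih _ (by rw [List.length_set, hlen])]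
        rw [if_neg (show ¬(0 < j ∧ (k : Int) + j < (n' : Int) ∧ (k : Int) + j = (t : Int)) from
          fun h => he h.2.2)]
        rw [pvGetD_set_ne best _ t htn]
    · rw [if_neg hc, ih _ hlen]
      rw [if_neg (show ¬(0 < j ∧ (k : Int) + j < (n' : Int) ∧ (k : Int) + j = (t : Int)) from
        fun h => hc ⟨h.1, h.2.1⟩)]

-- ===== proof-side names for the ports' pieces (definitionally equal to the inline lambdas)
def pvInit (costs : List Int) : List Int :=
  (List.replicate costs.length INF).set 0 ((PySem.List.pyGet? costs 0).getD 0)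

def pvStepA (costs jumps : List Int) (mc : List Int) (i : Nat) : List Int :=
  let r := jumps.foldl
    (fun r j => if j ≤ (i : Int) then r ++ [(PySem.List.pyGet? mc ((i : Int) - j)).getD 0] else r)
    [INF]
  mc.set i (costs.getD i 0 + (PySem.List.min? r (fun x => x)).getD 0)

def pvStepB (costs jumps : List Int) (st : List Int × List Int) (k : Nat) : List Int × List Int :=
  let mc := if k = 0 then st.2 else st.2.set k (costs.getD k 0 + st.1.getD k 0)
  let best := jumps.foldl
    (fun b j =>
      if 0 < j ∧ (k : Int) + j < (costs.length : Int) then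
        b.set ((k : Int) + j).toNat (min (b.getD ((k : Int) + j).toNat 0) (mc.getD k 0))
      else b)
    st.1
  (best, mc)

def pvA (costs jumps : List Int) (m : Nat) : List Int :=
  (List.range' 1 m).foldl (pvStepA costs jumps) (pvInit costs)

def pvBst (costs jumps : List Int) (m : Nat) : List Int × List Int :=
  (List.range m).foldl (pvStepB costs jumps) (List.replicate costs.length INF, pvInit costs)

theorem pvA_eq (costs jumps : List Int) :
    min_cost_grig costs jumps = pvA costs jumps (costs.length - 1) := rfl

theorem pvB_eq (costs jumps : List Int) :
    min_cost_grig_alt costs jumps = (pvBst costs jumps costs.length).2 := rfl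

theorem pvA_succ (costs jumps : List Int) (m : Nat) :
    pvA costs jumps (m + 1) = pvStepA costs jumps (pvA costs jumps m) (m + 1) := by
  unfold pvA
  rw [show List.range' 1 (m + 1) = List.range' 1 m ++ [1 + m] by
      simpa using List.range'_concat (s := 1) (n := m) (step := 1),
    List.foldl_append]
  simp [Nat.add_comm]

theorem pvBst_succ (costs jumps : List Int) (m : Nat) :
    pvBst costs jumps (m + 1) = pvStepB costs jumps (pvBst costs jumps m) m := by
  unfold pvBst
  rw [List.range_succ, List.foldl_append]
  simp

theorem pvGetD_replicate (n t : Nat) (h : t < n) : (List.replicate n INF).getD t 0 = INF := by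
  simp [List.getD_eq_getElem?_getD, h]

theorem pvInit_length (costs : List Int) : (pvInit costs).length = costs.length := by
  simp [pvInit]

theorem pvInit_getD_pos (costs : List Int) (t : Nat) (h0 : 0 < t) (h : t < costs.length) :
    (pvInit costs).getD t 0 = INF := by
  unfold pvInit
  rw [pvGetD_set_ne _ 0 t (by omega), pvGetD_replicate _ t (by simpa using h)]

theorem pvInv (costs jumps : List Int)
    (hj : ∀ j ∈ jumps, 0 ≤ j) :
    ∀ m, m < costs.length →
    (pvBst costs jumps (m + 1)).2 = pvA costs jumps m
    ∧ (pvBst costs jumps (m + 1)).1.length = costs.length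
    ∧ (pvA costs jumps m).length = costs.length
    ∧ (∀ t, m < t → t < costs.length → (pvA costs jumps m).getD t 0 = INF)
    ∧ (∀ t, m < t → t < costs.length →
        (pvBst costs jumps (m + 1)).1.getD t 0
          = Mfold jumps (fun j => (t : Int) - (m : Int) ≤ j ∧ j ≤ (t : Int))
              (fun j => (pvA costs jumps m).getD ((t : Int) - j).toNat 0) INF) := by
  intro m
  induction m with
  | zero =>
    intro h0
    have hb1 : pvBst costs jumps 1
        = pvStepB costs jumps (List.replicate costs.length INF, pvInit costs) 0 := by
      rw [show (1 : Nat) = 0 + 1 from rfl, pvBst_succ]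
      rfl
    have h2 : (pvBst costs jumps 1).2 = pvInit costs := by
      rw [hb1]; rfl
    have h1 : (pvBst costs jumps 1).1
        = jumps.foldl
            (fun b j =>
              if 0 < j ∧ ((0 : Nat) : Int) + j < (costs.length : Int) then
                b.set (((0 : Nat) : Int) + j).toNat
                  (min (b.getD (((0 : Nat) : Int) + j).toNat 0) ((pvInit costs).getD 0 0))
              else b)
            (List.replicate costs.length INF) := by
      rw [hb1]; rfl
    refine ⟨h2, ?_, by simp [pvA, pvInit_length], ?_, ?_⟩
    · rw [h1, pvPush_length, List.length_replicate]
    · intro t ht0 htn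
      show (pvInit costs).getD t 0 = INF
      exact pvInit_getD_pos costs t ht0 htn
    · intro t ht0 htn
      rw [h1, pvPush_getD 0 costs.length t (pvInit costs) jumps _ (by simp),
        pvGetD_replicate _ t htn]
      exact Mfold_congr _ _ _ _ jumps INF (fun j hjm => by
        refine ⟨by omega, fun hc1 => ?_⟩
        have hidx : ((t : Int) - j).toNat = 0 := by omega
        show (pvInit costs).getD 0 0 = (pvA costs jumps 0).getD ((t : Int) - j).toNat 0
        rw [hidx]
        rfl)
  | succ m ih =>
    intro hm1
    obtain ⟨hEq, hBlen, hAlen, hINF, hBest⟩ := ih (by omega)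
    -- the B step at k = m+1, componentwise
    have h2' : (pvBst costs jumps (m + 1 + 1)).2
        = (pvBst costs jumps (m + 1)).2.set (m + 1)
            (costs.getD (m + 1) 0 + (pvBst costs jumps (m + 1)).1.getD (m + 1) 0) := by
      rw [pvBst_succ]; rfl
    have h1' : (pvBst costs jumps (m + 1 + 1)).1
        = jumps.foldl
            (fun b j =>
              if 0 < j ∧ ((m + 1 : Nat) : Int) + j < (costs.length : Int) then
                b.set (((m + 1 : Nat) : Int) + j).toNat
                  (min (b.getD (((m + 1 : Nat) : Int) + j).toNat 0)
                    (((pvBst costs jumps (m + 1)).2.set (m + 1)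
                      (costs.getD (m + 1) 0
                        + (pvBst costs jumps (m + 1)).1.getD (m + 1) 0)).getD (m + 1) 0))
              else b)
            (pvBst costs jumps (m + 1)).1 := by
      rw [pvBst_succ]; rfl
    -- best[m+1] holds exactly A's pull-min for index m+1
    have hval : (pvBst costs jumps (m + 1)).1.getD (m + 1) 0
        = (PySem.List.min?
            (jumps.foldl
              (fun r j => if j ≤ ((m + 1 : Nat) : Int) then
                  r ++ [(PySem.List.pyGet? (pvA costs jumps m) (((m + 1 : Nat) : Int) - j)).getD 0]
                else r)
              [INF])
            (fun x => x)).getD 0 := by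
      rw [pvBuildMin _ _ jumps [INF] INF rfl,
        hBest (m + 1) (by omega) (by omega)]
      refine (Mfold_ext _ _ _ _ INF jumps INF (le_refl _) (fun j hjm => ?_)).symm
      have hj0 : 0 ≤ j := hj j hjm
      refine ⟨fun hc2 => ⟨by omega, ?_⟩, fun hc1 hc2 => ?_⟩
      · rw [PySem.List.pyGet?_of_nonneg _ (by omega)]
        simp [List.getD_eq_getElem?_getD]
      · have hj00 : j = 0 := by omega
        subst hj00
        rw [PySem.List.pyGet?_of_nonneg _ (by omega)]
        have hidx : (((m + 1 : Nat) : Int) - 0).toNat = m + 1 := by omega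
        rw [hidx, ← List.getD_eq_getElem?_getD]
        exact hINF (m + 1) (by omega) (by omega)
    have hmc : (pvBst costs jumps (m + 1 + 1)).2 = pvA costs jumps (m + 1) := by
      rw [h2', hEq, hval, pvA_succ]
      rfl
    refine ⟨hmc, ?_, ?_, ?_, ?_⟩
    · rw [h1', pvPush_length]
      exact hBlen
    · rw [pvA_succ]
      show ((pvA costs jumps m).set (m + 1) _).length = costs.length
      rw [List.length_set]
      exact hAlen
    · intro t ht htn
      rw [pvA_succ]
      show ((pvA costs jumps m).set (m + 1) _).getD t 0 = INF
      rw [pvGetD_set_ne _ _ _ (by omega)]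
      exact hINF t (by omega) htn
    · intro t ht htn
      rw [h1', pvPush_getD (m + 1) costs.length t _ jumps _ hBlen,
        hBest t (by omega) htn]
      -- name the common value function w
      have hMc : ((pvBst costs jumps (m + 1)).2.set (m + 1)
          (costs.getD (m + 1) 0 + (pvBst costs jumps (m + 1)).1.getD (m + 1) 0))
          = pvA costs jumps (m + 1) := by
        rw [← hmc, h2']
      -- inner congr: express the old window over the NEW array
      rw [Mfold_congr
          (fun j => (t : Int) - (m : Int) ≤ j ∧ j ≤ (t : Int))
          (fun j => (t : Int) - (m : Int) ≤ j ∧ j ≤ (t : Int))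
          (fun j => (pvA costs jumps m).getD ((t : Int) - j).toNat 0)
          (fun j => (pvA costs jumps (m + 1)).getD ((t : Int) - j).toNat 0)
          jumps INF
          (fun j hjm => ⟨Iff.rfl, fun hc => by
            rw [pvA_succ]
            show _ = ((pvA costs jumps m).set (m + 1) _).getD _ 0
            rw [pvGetD_set_ne _ _ _ (by omega)]⟩)]
      -- outer congr: the push is the single new window element
      rw [Mfold_congr
          (fun j => 0 < j ∧ ((m + 1 : Nat) : Int) + j < (costs.length : Int)
            ∧ ((m + 1 : Nat) : Int) + j = (t : Int))
          (fun j => j = (t : Int) - ((m + 1 : Nat) : Int))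
          (fun _ => ((pvBst costs jumps (m + 1)).2.set (m + 1)
            (costs.getD (m + 1) 0 + (pvBst costs jumps (m + 1)).1.getD (m + 1) 0)).getD (m + 1) 0)
          (fun j => (pvA costs jumps (m + 1)).getD ((t : Int) - j).toNat 0)
          jumps _
          (fun j hjm => ⟨by omega, fun hc => by
            have hidx : ((t : Int) - j).toNat = m + 1 := by omega
            simp only [hMc, hidx]⟩)]
      rw [Mfold_merge]
      exact Mfold_congr _ _ _ _ jumps INF (fun j hjm => ⟨by omega, fun _ => rfl⟩)

theorem pvMain (costs jumps : List Int) (hne : costs ≠ [])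
    (hpre : 2 ≤ costs.length → ∀ j ∈ jumps, 0 ≤ j) :
    min_cost_grig costs jumps = min_cost_grig_alt costs jumps := by
  have hlen : 0 < costs.length := List.length_pos_of_ne_nil hne
  rw [pvA_eq, pvB_eq]
  by_cases h2 : 2 ≤ costs.length
  · obtain ⟨hEq, -, -, -, -⟩ := pvInv costs jumps (hpre h2) (costs.length - 1) (by omega)
    rw [show costs.length - 1 + 1 = costs.length by omega] at hEq
    exact hEq.symm
  · have h1 : costs.length = 1 := by omega
    rw [h1]
    have hB : (pvBst costs jumps 1).2 = pvInit costs := by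
      rw [show (1 : Nat) = 0 + 1 from rfl, pvBst_succ]
      rfl
    rw [hB]
    rfl


-- ===== VERDICT (by name: the statement is the Claim_ definition above) =====
theorem min_cost_grig_spec : Claim_equal_min_cost_grig := by
  unfold Claim_equal_min_cost_grig
  intro costs jumps _ hpre
  unfold Pre_min_cost_grig at hpre
  unfold Spec_min_cost_grig
  exact pvMain costs jumps hpre.1 hpre.2

@[simp] theorem min_cost_grig_raises : Claim_raises_min_cost_grig := by
  unfold Claim_raises_min_cost_grig
  refine ⟨?_, by decide⟩
  rintro costs jumps _ ⟨hlen, j, hjmem, hjneg⟩ ⟨_, hpre⟩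
  exact absurd (hpre hlen j hjmem) (by omega)
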